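-- pv_equiv track=rewrite | github.com/alainbonardi/abclib | forPureDataLibrary/python/pdCanvasToMC.py | lastConnectLineNumber
-- ===== SOURCE A (Python) =====
-- def isConnection(myLine):
--     if (myLine[0:10] == "#X connect"):
--         return True
--     else:
--         return False
--
-- def lastConnectLineNumber(myCode):
--     i = 0
--     lineNumber = 0
--     for line in myCode:
--         if isConnection(line):
--             lineNumber = i
--         i = i+1
--     return lineNumber
-- ===== SOURCE B (Python) =====
-- def isConnection(myLine):
--     if (myLine[0:10] == "#X connect"):
--         return True
--     else:
--         return False
--
-- def lastConnectLineNumber(myCode):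
--     for i in range(len(myCode) - 1, -1, -1):
--         if isConnection(myCode[i]):
--             return i
--     return 0
-- ===== Notes on version B (the rewrite author's own statement) =====
-- stated objective: idiomatic
-- what changed: Scan backwards from the end with an early return at the first (i.e. last overall) connection line, instead of a forward pass that keeps overwriting an accumulator.
import Mathlib
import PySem

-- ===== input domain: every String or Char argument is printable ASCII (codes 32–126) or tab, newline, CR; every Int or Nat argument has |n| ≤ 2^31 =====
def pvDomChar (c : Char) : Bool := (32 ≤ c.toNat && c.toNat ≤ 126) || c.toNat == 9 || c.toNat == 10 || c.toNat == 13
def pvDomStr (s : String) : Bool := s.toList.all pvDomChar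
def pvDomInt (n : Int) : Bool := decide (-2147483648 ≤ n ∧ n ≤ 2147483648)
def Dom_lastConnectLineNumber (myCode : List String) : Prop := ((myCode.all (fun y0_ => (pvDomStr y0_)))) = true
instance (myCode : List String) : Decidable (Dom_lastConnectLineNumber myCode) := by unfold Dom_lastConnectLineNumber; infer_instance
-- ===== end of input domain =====

-- B scans backwards with an early return at the last connection line instead of A's
-- forward pass overwriting an accumulator; same result, more idiomatic (return value only).

-- ===== PORT A =====
-- isConnection(myLine): myLine[0:10] == "#X connect"
def pvIsConnection (myLine : String) : Bool :=
  if PySem.Str.slice myLine (some 0) (some 10) == "#X connect" then true else false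

-- state (i, lineNumber); body: if conn then lineNumber := i; i := i+1
def lastConnectLineNumber (myCode : List String) : Int :=
  (myCode.foldl (fun (st : Int × Int) line =>
      (st.1 + 1, if pvIsConnection line then st.1 else st.2)) (0, 0)).2

-- ===== PORT B =====
-- for i in range(len-1, -1, -1): if isConnection(myCode[i]): return i; return 0
-- pvAltGo myCode (k+1) inspects index k (always in range when called from _alt, so getD is exact)
def pvAltGo (myCode : List String) : Nat → Int
  | 0 => 0
  | k + 1 => if pvIsConnection (myCode.getD k "") then (k : Int) else pvAltGo myCode k

def lastConnectLineNumber_alt (myCode : List String) : Int :=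
  pvAltGo myCode myCode.length

-- ===== PRECONDITION & SPEC =====
def Spec_lastConnectLineNumber (myCode : List String) (out : Int) : Prop := out = lastConnectLineNumber_alt myCode
instance (myCode : List String) (out : Int) : Decidable (Spec_lastConnectLineNumber myCode out) := by unfold Spec_lastConnectLineNumber; infer_instance

-- ===== CLAIM (what is proved, stated in full; the proofs are below) =====
def Claim_equal_lastConnectLineNumber : Prop := ∀ (myCode : List String), Dom_lastConnectLineNumber myCode → Spec_lastConnectLineNumber myCode (lastConnectLineNumber myCode)

-- ===== LEMMAS AND PROOFS =====

theorem pvFoldl_fst (xs : List String) (st : Int × Int) :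
    (xs.foldl (fun (st : Int × Int) line =>
      (st.1 + 1, if pvIsConnection line then st.1 else st.2)) st).1 = st.1 + xs.length := by
  induction xs generalizing st with
  | nil => simp
  | cons x xs ih => simp [List.foldl, ih]; ring

theorem pvAltGo_append (xs : List String) (x : String) (k : Nat) (hk : k ≤ xs.length) :
    pvAltGo (xs ++ [x]) k = pvAltGo xs k := by
  induction k with
  | zero => rfl
  | succ k ih =>
    have hlt : k < xs.length := hk
    simp [pvAltGo, List.getD, List.getElem?_append_left hlt, ih (Nat.le_of_lt hlt)]

theorem pvMain (xs : List String) :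
    lastConnectLineNumber xs = lastConnectLineNumber_alt xs := by
  induction xs using List.reverseRecOn with
  | nil => rfl
  | append_singleton xs x ih =>
    unfold lastConnectLineNumber lastConnectLineNumber_alt at *
    rw [List.foldl_append]
    have hfst := pvFoldl_fst xs (0, 0)
    have hget : (xs ++ [x]).getD xs.length "" = x := by
      simp
    simp only [List.foldl, List.length_append, List.length_cons, List.length_nil,
      Nat.zero_add, pvAltGo]
    rw [pvAltGo_append xs x xs.length (le_refl _)]
    rw [hget]
    by_cases h : pvIsConnection x
    · simp [h, hfst]
    · simpa [h] using ih

-- ===== VERDICT (by name: the statement is the Claim_ definition above) =====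
theorem lastConnectLineNumber_spec : Claim_equal_lastConnectLineNumber := by
  intro myCode _
  exact pvMain myCode
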